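-- pv_equiv track=rewrite | github.com/nina-mir/w3-python-excercises | string_exercises.py | dollar_maker
-- ===== SOURCE A (Python) =====
-- def dollar_maker(str):
--     str_changed = ''
--     count = 0
--     for char in str:
--         if char == str[0] and count > 0:
--             str_changed += '$'
--         else:
--             str_changed += char
--         count += 1
--     return str_changed
-- ===== SOURCE B (Python) =====
-- def dollar_maker(str):
--     if not str:
--         return str
--     return str[0] + str[1:].replace(str[0], '$')
-- ===== Notes on version B (the rewrite author's own statement) =====
-- stated objective: idiomatic
-- what changed: Replaces A's character-by-character loop with a running count and per-char equality branch by an empty-string guard plus a single built-in str.replace on the tail, keeping the first character untouched.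
import Mathlib
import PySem

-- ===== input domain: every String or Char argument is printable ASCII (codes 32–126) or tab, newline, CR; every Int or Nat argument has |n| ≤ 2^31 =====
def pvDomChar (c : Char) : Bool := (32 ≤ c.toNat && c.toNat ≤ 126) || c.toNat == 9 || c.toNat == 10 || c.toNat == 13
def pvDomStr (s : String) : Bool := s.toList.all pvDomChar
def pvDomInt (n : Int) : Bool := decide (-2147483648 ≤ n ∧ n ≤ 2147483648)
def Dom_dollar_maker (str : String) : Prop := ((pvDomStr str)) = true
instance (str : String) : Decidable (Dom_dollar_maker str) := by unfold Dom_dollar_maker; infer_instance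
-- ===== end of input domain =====

-- B replaces A's per-character loop (running count, equality branch) by an
-- empty-string guard plus a single built-in str.replace on the tail (idiomatic).


-- ===== PORT A =====
-- str_changed and count accumulated over each character; str[0] via PySem.Str.pyGet?
-- (only evaluated inside the loop, i.e. when str is nonempty, exactly as in Python).
def dollar_maker (str : String) : String :=
  let first := PySem.Str.pyGet? str 0
  let r := str.toList.foldl
    (fun (st : List Char × Nat) ch =>
      (st.1 ++ (if some ch == first && decide (st.2 > 0) then ['$'] else [ch]), st.2 + 1))
    ([], 0)
  String.ofList r.1

-- ===== PORT B =====
-- if not str: return str;  return str[0] + str[1:].replace(str[0], '$')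
def dollar_maker_alt (str : String) : String :=
  if str.isEmpty then str
  else
    match PySem.Str.pyGet? str 0 with
    | none => str   -- unreachable: str is nonempty
    | some c =>
        String.ofList [c] ++ PySem.Str.replace (PySem.Str.slice str (some 1) none) (String.ofList [c]) "$"

-- ===== PRECONDITION & SPEC =====
def Spec_dollar_maker (str : String) (out : String) : Prop := out = dollar_maker_alt str
instance (str : String) (out : String) : Decidable (Spec_dollar_maker str out) := by unfold Spec_dollar_maker; infer_instance

-- ===== CLAIM (what is proved, stated in full; the proofs are below) =====
def Claim_equal_dollar_maker : Prop := ∀ (str : String), Dom_dollar_maker str → Spec_dollar_maker str (dollar_maker str)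

-- ===== LEMMAS AND PROOFS =====

-- single-character replace is a map
theorem replace_go_single (c d : Char) :
    ∀ (l acc : List Char) (fuel : Nat), l.length ≤ fuel →
      PySem.Chars.replace.go [c] [d] fuel l acc
        = acc.reverse ++ l.map (fun x => if x == c then d else x) := by
  intro l
  induction l with
  | nil =>
      intro acc fuel _
      cases fuel <;> simp [PySem.Chars.replace.go]
  | cons h t ih =>
      intro acc fuel hf
      cases fuel with
      | zero => simp at hf
      | succ n =>
          by_cases hc : h = c
          · subst hc
            simp only [PySem.Chars.replace.go, List.isPrefixOf]
            rw [if_pos (by simp)]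
            simpa using ih (([d]).reverse ++ acc) n (by simpa using hf)
          · simp only [PySem.Chars.replace.go]
            have : List.isPrefixOf [c] (h :: t) = false := by
              simp [List.isPrefixOf]; intro h'; exact absurd h'.symm hc
            rw [this]
            simp only [Bool.false_eq_true, if_false]
            rw [ih (h :: acc) n (by simpa using hf)]
            simp [hc]

theorem replace_single (c d : Char) (l : List Char) :
    PySem.Chars.replace l [c] [d] = l.map (fun x => if x == c then d else x) := by
  simp [PySem.Chars.replace, replace_go_single c d l [] l.length le_rfl]

-- A's loop with a positive count appends the mapped characters
theorem loopA (c : Char) :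
    ∀ (l acc : List Char) (n : Nat), 0 < n →
      (l.foldl
        (fun (st : List Char × Nat) ch =>
          (st.1 ++ (if some ch == some c && decide (st.2 > 0) then ['$'] else [ch]), st.2 + 1))
        (acc, n)).1
      = acc ++ l.map (fun x => if x == c then '$' else x) := by
  intro l
  induction l with
  | nil => intro acc n _; simp
  | cons h t ih =>
      intro acc n hn
      simp only [List.foldl_cons]
      rw [ih _ (n + 1) (by omega)]
      by_cases hc : h = c
      · subst hc; simp [hn]
      · simp [hc]

-- ===== VERDICT (by name: the statement is the Claim_ definition above) =====
theorem dollar_maker_spec : Claim_equal_dollar_maker := by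
  intro str _
  unfold Spec_dollar_maker dollar_maker dollar_maker_alt
  rcases h : str.toList with _ | ⟨c, t⟩
  · -- empty string
    have he : str = "" := String.toList_eq_nil_iff.mp h
    subst he
    simp [h]
  · -- nonempty string
    have hfirst : PySem.Str.pyGet? str 0 = some c := by
      simp [PySem.Str.pyGet?, PySem.Chars.pyGet?, PySem.List.pyGet?, h, PySem.List.pyIdx?]
    have hne : str.isEmpty = false := by
      by_contra hb
      simp only [Bool.not_eq_false] at hb
      rw [String.isEmpty_iff.mp hb] at h
      simp at h
    have hslice : (PySem.Str.slice str (some 1) none).toList = t := by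
      simp [PySem.Str.toList_slice, PySem.List.slice_from, h]
    refine String.toList_inj.mp ?_
    simp only [hne, hfirst, List.foldl_cons, Bool.false_eq_true, if_false]
    rw [show (some c == some c && decide ((0:Nat) > 0)) = false by simp]
    simp only [Bool.false_eq_true, if_false, List.nil_append]
    rw [loopA c t [c] 1 Nat.one_pos]
    simp [hslice, PySem.Str.toList_replace, replace_single]
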